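-- pv_equiv track=rewrite | github.com/seeker1207/- | 프로그래머스 고득점 kit/동적계획법/서울에서 경산까지.py | solution
-- ===== SOURCE A (Python) =====
-- def solution(K, travel):
--     answer = 0
--     cache = [[0] * (K + 1) for _ in range(len(travel) + 1)]
--     start_t = 0
--
--     for i in range(1, len(travel) + 1):
--         for k in range(0, K + 1):
--
--             walk_t, walk_v = travel[i - 1][0], travel[i - 1][1]
--             bicycle_t, bicycle_v = travel[i - 1][2], travel[i - 1][3]
--
--             if walk_t <= k and i == 1:
--                 cache[i][k] = cache[i - 1][k - walk_t] + walk_v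
--             if walk_t <= k and i > 1 and cache[i - 1][k - walk_t]:
--                 cache[i][k] = cache[i - 1][k - walk_t] + walk_v
--
--             if bicycle_t <= k and i == 1:
--                 cache[i][k] = max(cache[i][k], cache[i - 1][k - bicycle_t] + bicycle_v)
--             if bicycle_t <= k and i > 1 and cache[i - 1][k - bicycle_t]:
--                 cache[i][k] = max(cache[i][k], cache[i - 1][k - bicycle_t] + bicycle_v)
--
--     answer = cache[len(travel)][K]
--
--     return answer
-- ===== SOURCE B (Python) =====
-- def solution(K, travel):
--     n = len(travel)
--     # backward pass: which time budgets can matter after i legs (demand-driven,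
--     # instead of filling the whole (n+1) x (K+1) table)
--     top = {K}
--     levels = [top]
--     cur = top
--     for t in reversed(travel):
--         nxt = set()
--         for k in cur:
--             if t[0] <= k:
--                 nxt.add(k - t[0])
--             if t[2] <= k:
--                 nxt.add(k - t[2])
--         levels.append(nxt)
--         cur = nxt
--     needs = levels[::-1]  # needs[i] = budgets that can matter after the first i legs
--     # forward pass: best values, only on the needed budgets
--     vals = {}
--     for k in needs[0]:
--         vals[k] = 0
--     for i in range(1, n + 1):
--         t = travel[i - 1]
--         wt, wv, bt, bv = t[0], t[1], t[2], t[3]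
--         new = {}
--         for k in needs[i]:
--             best = 0
--             if wt <= k and (i == 1 or vals.get(k - wt, 0)):
--                 best = vals.get(k - wt, 0) + wv
--             if bt <= k and (i == 1 or vals.get(k - bt, 0)):
--                 best = max(best, vals.get(k - bt, 0) + bv)
--             new[k] = best
--         vals = new
--     return vals.get(K, 0)
-- ===== Notes on version B (the rewrite author's own statement) =====
-- stated objective: faster
-- what changed: Replaces A's dense bottom-up fill of the whole (n+1)x(K+1) table by a demand-driven sparse DP: a backward pass computes, per leg, the set of time budgets that can actually matter for the goal state (n, K), and a forward pass evaluates the recurrence only on those budgets via per-level dicts.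
import Mathlib
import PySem

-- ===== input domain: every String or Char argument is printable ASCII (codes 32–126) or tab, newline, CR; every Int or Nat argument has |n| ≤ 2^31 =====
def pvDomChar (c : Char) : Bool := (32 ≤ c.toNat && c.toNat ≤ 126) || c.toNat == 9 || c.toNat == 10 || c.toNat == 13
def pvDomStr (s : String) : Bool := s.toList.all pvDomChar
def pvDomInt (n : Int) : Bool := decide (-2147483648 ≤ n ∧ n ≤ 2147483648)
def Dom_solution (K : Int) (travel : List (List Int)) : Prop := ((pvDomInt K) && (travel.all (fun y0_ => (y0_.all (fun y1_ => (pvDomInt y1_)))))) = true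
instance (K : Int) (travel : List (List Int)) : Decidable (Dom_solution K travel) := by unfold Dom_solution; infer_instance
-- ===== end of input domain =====

-- B replaces A's dense fill of the whole (n+1)×(K+1) table by a demand-driven sparse DP: a
-- backward pass collects, per leg, the set of time budgets that can matter for the goal state
-- (n, K), and a forward pass evaluates the recurrence only on those budgets via per-level dicts
-- (O(n*S) with S = reachable budgets per level instead of O(n*K); a timing run measured B
-- faster; return-value equivalence is proved on Pre_solution).

-- ===== PORT A =====
-- cache[i][k] reads/writes; every index reached under Pre_solution is nonnegative and in range,
-- where .toNat / getD / set are exact for Python's list indexing.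
def cgetA (c : List (List Int)) (i k : Int) : Int := (c.getD i.toNat []).getD k.toNat 0

def csetA (c : List (List Int)) (i k : Int) (v : Int) : List (List Int) :=
  c.set i.toNat ((c.getD i.toNat []).set k.toNat v)

-- body of A's inner loop (one (i, k) iteration, the four sequential ifs)
def innerBodyA (travel : List (List Int)) (i : Int) (c : List (List Int)) (k : Int) : List (List Int) :=
  let t := travel.getD (i - 1).toNat []
  let walk_t := t.getD 0 0
  let walk_v := t.getD 1 0
  let bicycle_t := t.getD 2 0
  let bicycle_v := t.getD 3 0
  let c := if walk_t ≤ k ∧ i = 1 then csetA c i k (cgetA c (i - 1) (k - walk_t) + walk_v) else c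
  let c := if walk_t ≤ k ∧ 1 < i ∧ cgetA c (i - 1) (k - walk_t) ≠ 0 then
      csetA c i k (cgetA c (i - 1) (k - walk_t) + walk_v) else c
  let c := if bicycle_t ≤ k ∧ i = 1 then
      csetA c i k (max (cgetA c i k) (cgetA c (i - 1) (k - bicycle_t) + bicycle_v)) else c
  let c := if bicycle_t ≤ k ∧ 1 < i ∧ cgetA c (i - 1) (k - bicycle_t) ≠ 0 then
      csetA c i k (max (cgetA c i k) (cgetA c (i - 1) (k - bicycle_t) + bicycle_v)) else c
  c

def solution (K : Int) (travel : List (List Int)) : Int :=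
  let cache0 : List (List Int) :=
    List.replicate (travel.length + 1) (List.replicate (K + 1).toNat 0)
  let cache := (PySem.List.pyRange 1 ((travel.length : Int) + 1) 1).foldl
    (fun c i => (PySem.List.pyRange 0 (K + 1) 1).foldl (innerBodyA travel i) c) cache0
  cgetA cache (travel.length : Int) K

-- ===== PORT B =====
-- backward step: nxt = set(); for k in cur: if t[0] <= k: nxt.add(k - t[0]); if t[2] <= k: nxt.add(k - t[2])
def altBack (t : List Int) (cur : PySem.Set Int) : PySem.Set Int :=
  cur.foldl (fun nxt k =>
    let nxt := if t.getD 0 0 ≤ k then PySem.Set.add nxt (k - t.getD 0 0) else nxt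
    if t.getD 2 0 ≤ k then PySem.Set.add nxt (k - t.getD 2 0) else nxt) PySem.Set.empty

-- levels = [{K}]; cur = {K}; for t in reversed(travel): nxt = back-step; levels.append(nxt); cur = nxt
-- needs = levels[::-1]   (the [::-1] slice is exactly List.reverse)
def altNeeds (K : Int) (travel : List (List Int)) : List (PySem.Set Int) :=
  let top := PySem.Set.add PySem.Set.empty K
  let fin := travel.reverse.foldl
    (fun (st : List (PySem.Set Int) × PySem.Set Int) t =>
      let nxt := altBack t st.2
      (st.1 ++ [nxt], nxt)) ([top], top)
  fin.1.reverse

-- body of the forward inner loop (vals.get(k - wt, 0) is Dict.getD)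
def altCellB (wt wv bt bv : Int) (vals : PySem.Dict Int Int) (i k : Int) : Int :=
  let best : Int := if wt ≤ k ∧ (i = 1 ∨ vals.getD (k - wt) 0 ≠ 0)
    then vals.getD (k - wt) 0 + wv else 0
  if bt ≤ k ∧ (i = 1 ∨ vals.getD (k - bt) 0 ≠ 0)
    then max best (vals.getD (k - bt) 0 + bv) else best

-- one forward level: new = {}; for k in needs[i]: new[k] = best; vals = new
-- (i ≥ 1 and the needs index are nonnegative, so .toNat is exact Python indexing)
def altLevel (needs : List (PySem.Set Int)) (travel : List (List Int))
    (vals : PySem.Dict Int Int) (i : Int) : PySem.Dict Int Int :=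
  let t := travel.getD (i - 1).toNat []
  (needs.getD i.toNat PySem.Set.empty).foldl
    (fun cur k => cur.insert k (altCellB (t.getD 0 0) (t.getD 1 0) (t.getD 2 0) (t.getD 3 0) vals i k))
    PySem.Dict.empty

def solution_alt (K : Int) (travel : List (List Int)) : Int :=
  let needs := altNeeds K travel
  let vals0 := (needs.getD 0 PySem.Set.empty).foldl
    (fun (d : PySem.Dict Int Int) k => d.insert k 0) PySem.Dict.empty
  let vals := (PySem.List.pyRange 1 ((travel.length : Int) + 1) 1).foldl (altLevel needs travel) vals0
  vals.getD K 0

-- ===== PRECONDITION & SPEC =====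
-- Pre_solution is exactly where Python A returns normally: K < 0, a leg with fewer than 4 entries,
-- or a negative walk/bicycle time make A raise IndexError.
def Pre_solution (K : Int) (travel : List (List Int)) : Prop :=
  0 ≤ K ∧ ∀ t ∈ travel, 4 ≤ t.length ∧ 0 ≤ t.getD 0 0 ∧ 0 ≤ t.getD 2 0
instance (K : Int) (travel : List (List Int)) : Decidable (Pre_solution K travel) := by
  unfold Pre_solution; infer_instance

def pvWitness_solution : Int × List (List Int) := (3, [[1, 2, 2, 3], [1, 1, 3, 4]])

def Spec_solution (K : Int) (travel : List (List Int)) (out : Int) : Prop := out = solution_alt K travel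
instance (K : Int) (travel : List (List Int)) (out : Int) : Decidable (Spec_solution K travel out) := by
  unfold Spec_solution; infer_instance

-- ===== CLAIM (what is proved, stated in full; the proofs are below) =====
def Claim_equal_solution : Prop := ∀ (K : Int) (travel : List (List Int)),
  Dom_solution K travel → Pre_solution K travel → Spec_solution K travel (solution K travel)

-- ===== LEMMAS AND PROOFS =====

-- the common specification both programs compute: gP travel i k = best value over the first i legs
-- within exact budget bookkeeping, with A's "0 means unreachable" guard for i > 1
def gP (travel : List (List Int)) : Nat → Int → Int
  | 0, _ => 0
  | j + 1, k =>
    let t := travel.getD j []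
    let best : Int := if t.getD 0 0 ≤ k ∧ (j = 0 ∨ gP travel j (k - t.getD 0 0) ≠ 0)
      then gP travel j (k - t.getD 0 0) + t.getD 1 0 else 0
    if t.getD 2 0 ≤ k ∧ (j = 0 ∨ gP travel j (k - t.getD 2 0) ≠ 0)
      then max best (gP travel j (k - t.getD 2 0) + t.getD 3 0) else best

-- ---- A-side: the table computation row by row ----

-- cell value written by A's four ifs, prev row and first-row flag abstracted
def altCell (wt wv bt bv : Int) (prev : List Int) (first : Bool) (k : Int) : Int :=
  let best : Int :=
    if wt ≤ k ∧ (first = true ∨ prev.getD (k - wt).toNat 0 ≠ 0) then prev.getD (k - wt).toNat 0 + wv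
    else 0
  if bt ≤ k ∧ (first = true ∨ prev.getD (k - bt).toNat 0 ≠ 0) then
    max best (prev.getD (k - bt).toNat 0 + bv)
  else best

def altStep (K : Int) (prev : List Int) (t : List Int) (first : Bool) : List Int :=
  (PySem.List.pyRange 0 (K + 1) 1).map
    (altCell (t.getD 0 0) (t.getD 1 0) (t.getD 2 0) (t.getD 3 0) prev first)

-- the zero row [0] * (K + 1)
def zrowP (K : Int) : List Int := List.replicate (K + 1).toNat 0

-- the DP row after the first j legs
def browP (K : Int) (travel : List (List Int)) : Nat → List Int
  | 0 => zrowP K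
  | j + 1 => altStep K (browP K travel j) (travel.getD j []) (decide (j = 0))

-- A's table after the first m outer iterations
def tableP (K : Int) (travel : List (List Int)) (m : Nat) : List (List Int) :=
  (List.range (travel.length + 1)).map
    (fun j => if 1 ≤ j ∧ j ≤ m then browP K travel j else zrowP K)

theorem set_of_getD {α : Type} (xs : List α) (a : Nat) (d : α) :
    xs.set a (xs.getD a d) = xs := by
  apply List.ext_getElem (by simp)
  intro i h1 h2
  rw [List.getElem_set]
  split
  · subst i; rw [List.getD_eq_getElem _ _ (by simpa using h1)]
  · rfl

theorem getD_tableP (K : Int) (travel : List (List Int)) (m j : Nat)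
    (hj : j ≤ travel.length) :
    (tableP K travel m).getD j [] = if 1 ≤ j ∧ j ≤ m then browP K travel j else zrowP K := by
  have hj' : j < travel.length + 1 := Nat.lt_succ_of_le hj
  simp [tableP, List.getD_eq_getElem?_getD, hj']

theorem length_tableP (K : Int) (travel : List (List Int)) (m : Nat) :
    (tableP K travel m).length = travel.length + 1 := by
  simp [tableP]

theorem getD_csetA_prev (c : List (List Int)) (i : Int) (hi : 1 ≤ i) (k v : Int) :
    (csetA c i k v).getD (i - 1).toNat [] = c.getD (i - 1).toNat [] := by
  unfold csetA
  rw [List.getD_eq_getElem?_getD, List.getElem?_set_ne (by omega), ← List.getD_eq_getElem?_getD]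

theorem getD_csetA_self (c : List (List Int)) (i k v : Int) (hlen : i.toNat < c.length) :
    (csetA c i k v).getD i.toNat [] = (c.getD i.toNat []).set k.toNat v := by
  unfold csetA
  rw [List.getD_eq_getElem?_getD, List.getElem?_set_self hlen]
  rfl

theorem cget_csetA_self (c : List (List Int)) (i k : Int) (hlen : i.toNat < c.length)
    (hklen : k.toNat < (c.getD i.toNat []).length) (v : Int) :
    ((csetA c i k v).getD i.toNat []).getD k.toNat 0 = v := by
  rw [getD_csetA_self c i k v hlen, List.getD_eq_getElem?_getD, List.getElem?_set_self hklen]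
  rfl

theorem csetA_csetA (c : List (List Int)) (i k v w : Int) :
    csetA (csetA c i k v) i k w = csetA c i k w := by
  by_cases hlen : i.toNat < c.length
  · unfold csetA
    rw [show ((c.set i.toNat ((c.getD i.toNat []).set k.toNat v)).getD i.toNat []) =
        (c.getD i.toNat []).set k.toNat v from getD_csetA_self c i k v hlen]
    rw [List.set_set, List.set_set]
  · have h1 : csetA c i k v = c := by
      unfold csetA; exact List.set_eq_of_length_le (by omega)
    rw [h1]

theorem csetA_zero_self (c : List (List Int)) (i k : Int)
    (hzero : (c.getD i.toNat []).getD k.toNat 0 = 0) :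
    csetA c i k 0 = c := by
  unfold csetA
  rw [← hzero, set_of_getD, set_of_getD]

theorem altCell_first (wt wv bt bv : Int) (prev : List Int) (k : Int) :
    altCell wt wv bt bv prev true k =
      (if bt ≤ k then
        max (if wt ≤ k then prev.getD (k - wt).toNat 0 + wv else 0) (prev.getD (k - bt).toNat 0 + bv)
      else if wt ≤ k then prev.getD (k - wt).toNat 0 + wv else 0) := by
  simp [altCell]

theorem altCell_rest (wt wv bt bv : Int) (prev : List Int) (k : Int) :
    altCell wt wv bt bv prev false k =
      (if bt ≤ k ∧ prev.getD (k - bt).toNat 0 ≠ 0 then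
        max (if wt ≤ k ∧ prev.getD (k - wt).toNat 0 ≠ 0 then prev.getD (k - wt).toNat 0 + wv else 0)
          (prev.getD (k - bt).toNat 0 + bv)
      else if wt ≤ k ∧ prev.getD (k - wt).toNat 0 ≠ 0 then prev.getD (k - wt).toNat 0 + wv else 0) := by
  simp [altCell]

-- one (i,k) iteration of A equals a single write of the abstract cell value
theorem stepA_eq (travel : List (List Int)) (i k : Int) (c : List (List Int))
    (hi : 1 ≤ i) (_hk : 0 ≤ k)
    (hlen : i.toNat < c.length)
    (hklen : k.toNat < (c.getD i.toNat []).length)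
    (hzero : (c.getD i.toNat []).getD k.toNat 0 = 0) :
    innerBodyA travel i c k =
      csetA c i k
        (altCell ((travel.getD (i - 1).toNat []).getD 0 0) ((travel.getD (i - 1).toNat []).getD 1 0)
          ((travel.getD (i - 1).toNat []).getD 2 0) ((travel.getD (i - 1).toNat []).getD 3 0)
          (c.getD (i - 1).toNat []) (decide (i = 1)) k) := by
  have hi' : i = 1 ∨ 1 < i := by omega
  simp only [innerBodyA, cgetA]
  rcases hi' with h1 | h1
  · subst h1
    rw [show (decide ((1:Int) = 1)) = true by simp, altCell_first]
    simp only [and_true, show ¬((1:Int) < 1) from by omega, false_and,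
      and_false, if_false]
    by_cases hw : (travel.getD ((1:Int) - 1).toNat []).getD 0 0 ≤ k <;>
      by_cases hb : (travel.getD ((1:Int) - 1).toNat []).getD 2 0 ≤ k <;>
      simp only [hw, hb, if_true, if_false, true_and, and_true, false_and, and_false,
        getD_csetA_prev c 1 (by omega), cget_csetA_self c 1 k hlen hklen, csetA_csetA, hzero] <;>
      first
        | rfl
        | exact (csetA_zero_self c 1 k hzero).symm
  · have hne : ¬(i = 1) := by omega
    rw [show (decide (i = 1)) = false from decide_eq_false hne, altCell_rest]
    simp only [hne, and_false, false_and, if_false, h1, true_and]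
    by_cases hw1 : (travel.getD (i - 1).toNat []).getD 0 0 ≤ k <;>
      by_cases hw2 : (c.getD (i - 1).toNat []).getD
          (k - (travel.getD (i - 1).toNat []).getD 0 0).toNat 0 ≠ 0 <;>
      by_cases hb1 : (travel.getD (i - 1).toNat []).getD 2 0 ≤ k <;>
      by_cases hb2 : (c.getD (i - 1).toNat []).getD
          (k - (travel.getD (i - 1).toNat []).getD 2 0).toNat 0 ≠ 0 <;>
      simp only [hw1, hw2, hb1, hb2, ne_eq, not_false_eq_true, not_true_eq_false, if_true,
        if_false, true_and, and_true, false_and, and_false,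
        getD_csetA_prev c i (by omega), cget_csetA_self c i k hlen hklen, csetA_csetA, hzero] <;>
      first
        | rfl
        | exact (csetA_zero_self c i k hzero).symm

theorem length_csetA (c : List (List Int)) (i k v : Int) : (csetA c i k v).length = c.length := by
  unfold csetA; simp

theorem getD_set_ne (r : List Int) (a b : Nat) (v : Int) (h : a ≠ b) :
    (r.set a v).getD b 0 = r.getD b 0 := by
  rw [List.getD_eq_getElem?_getD, List.getElem?_set_ne h, ← List.getD_eq_getElem?_getD]

-- A's inner fold is a fold of single writes of the abstract cell values (prev row fixed)
theorem innerFold_eq (travel : List (List Int)) (i : Int) (hi : 1 ≤ i) (prev : List Int) :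
    ∀ (ks : List Int) (c : List (List Int)),
      i.toNat < c.length →
      c.getD (i - 1).toNat [] = prev →
      (∀ k ∈ ks, 0 ≤ k ∧ k.toNat < (c.getD i.toNat []).length ∧
        (c.getD i.toNat []).getD k.toNat 0 = 0) →
      ks.Pairwise (· < ·) →
      ks.foldl (innerBodyA travel i) c =
        ks.foldl (fun d k =>
          csetA d i k
            (altCell ((travel.getD (i - 1).toNat []).getD 0 0) ((travel.getD (i - 1).toNat []).getD 1 0)
              ((travel.getD (i - 1).toNat []).getD 2 0) ((travel.getD (i - 1).toNat []).getD 3 0)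
              prev (decide (i = 1)) k)) c := by
  intro ks
  induction ks with
  | nil => intro c _ _ _ _; rfl
  | cons k ks ih =>
    intro c hlen hprev hzero hpw
    obtain ⟨hk0, hklen, hkz⟩ := hzero k (by simp)
    rw [List.foldl_cons, List.foldl_cons, stepA_eq travel i k c hi hk0 hlen hklen hkz, hprev]
    apply ih
    · rw [length_csetA]; exact hlen
    · rw [getD_csetA_prev c i hi, hprev]
    · intro k' hk'
      obtain ⟨hk0', hklen', hkz'⟩ := hzero k' (by simp [hk'])
      have hlt : k < k' := (List.pairwise_cons.mp hpw).1 k' hk'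
      have hne : k.toNat ≠ k'.toNat := by omega
      rw [getD_csetA_self c i k _ hlen]
      refine ⟨hk0', by simpa using hklen', ?_⟩
      rw [getD_set_ne _ _ _ _ hne, hkz']
    · exact (List.pairwise_cons.mp hpw).2

-- a fold of writes into one row collapses to a single row update
theorem foldl_cset (i : Int) (f : Int → Int) :
    ∀ (ks : List Int) (c : List (List Int)), i.toNat < c.length →
      ks.foldl (fun c k => csetA c i k (f k)) c =
        c.set i.toNat (ks.foldl (fun r k => r.set k.toNat (f k)) (c.getD i.toNat [])) := by
  intro ks
  induction ks with
  | nil => intro c hlen; exact (set_of_getD c i.toNat []).symm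
  | cons k ks ih =>
    intro c hlen
    rw [List.foldl_cons, List.foldl_cons, ih _ (by rw [length_csetA]; exact hlen),
      getD_csetA_self c i k _ hlen]
    unfold csetA
    rw [List.set_set]

-- filling every position a..b-1 of a row of length b gives the comprehension row
theorem fill_row (b : Int) (f : Int → Int) :
    ∀ (a : Int), 0 ≤ a → ∀ (r : List Int), r.length = b.toNat →
      (PySem.List.pyRange a b 1).foldl (fun r k => r.set k.toNat (f k)) r =
        r.take a.toNat ++ (PySem.List.pyRange a b 1).map f := by
  intro a
  induction h : (b - a).toNat using Nat.strong_induction_on generalizing a with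
  | _ n ih =>
  intro ha r hr
  by_cases hab : b ≤ a
  · rw [PySem.List.pyRange_one_eq_nil hab]
    simp [List.take_of_length_le (by omega : r.length ≤ a.toNat)]
  · have hab' : a < b := by omega
    rw [PySem.List.pyRange_one_cons hab']
    rw [List.foldl_cons, List.map_cons]
    rw [ih (b - (a + 1)).toNat (by omega) (a + 1) rfl (by omega) _ (by simpa using hr)]
    have h1 : (r.set a.toNat (f a)).take (a + 1).toNat = r.take a.toNat ++ [f a] := by
      have h2 : (a + 1).toNat = a.toNat + 1 := by omega
      rw [h2, List.take_succ, List.take_set, List.set_eq_of_length_le (by simp),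
        List.getElem?_set_self (by omega)]
      rfl
    rw [h1, List.append_assoc]
    rfl

theorem getD_zrowP (K : Int) (a : Nat) : (zrowP K).getD a 0 = 0 := by
  unfold zrowP
  rw [List.getD_eq_getElem?_getD, List.getElem?_replicate]
  split <;> rfl

theorem length_zrowP (K : Int) : (zrowP K).length = (K + 1).toNat := by simp [zrowP]

theorem tableP_zero (K : Int) (travel : List (List Int)) :
    tableP K travel 0 = List.replicate (travel.length + 1) (zrowP K) := by
  unfold tableP
  have h : (fun j => if 1 ≤ j ∧ j ≤ 0 then browP K travel j else zrowP K) =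
      (fun _ : Nat => zrowP K) := by
    funext j
    have : ¬(1 ≤ j ∧ j ≤ 0) := by omega
    rw [if_neg this]
  rw [h, List.map_const', List.length_range]

theorem set_tableP (K : Int) (travel : List (List Int)) (m : Nat) (hm : m < travel.length) :
    (tableP K travel m).set (m + 1) (browP K travel (m + 1)) = tableP K travel (m + 1) := by
  apply List.ext_getElem (by simp [tableP])
  intro j h1 h2
  rw [List.getElem_set]
  simp only [tableP, List.getElem_map, List.getElem_range]
  have h3 : j < travel.length + 1 := by simpa [tableP] using h2
  split
  · rename_i hj
    subst hj
    simp [Nat.le_add_left]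
  · rename_i hj
    have : (1 ≤ j ∧ j ≤ m) ↔ (1 ≤ j ∧ j ≤ m + 1) := by omega
    simp only [this]

-- one full outer iteration of A advances the table by one row
theorem outer_step (K : Int) (travel : List (List Int)) (m : Nat) (hm : m < travel.length) :
    (PySem.List.pyRange 0 (K + 1) 1).foldl (innerBodyA travel ((m : Int) + 1)) (tableP K travel m) =
      tableP K travel (m + 1) := by
  have hi : (1 : Int) ≤ (m : Int) + 1 := by omega
  have htn : ((m : Int) + 1).toNat = m + 1 := by omega
  have htp : ((m : Int) + 1 - 1).toNat = m := by omega
  have hprev : (tableP K travel m).getD ((m : Int) + 1 - 1).toNat [] = browP K travel m := by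
    rw [htp, getD_tableP K travel m m (le_of_lt hm)]
    cases m with
    | zero => simp [browP]
    | succ m' => simp
  have hrow : (tableP K travel m).getD ((m : Int) + 1).toNat [] = zrowP K := by
    rw [htn, getD_tableP K travel m (m + 1) hm]
    have : ¬(1 ≤ m + 1 ∧ m + 1 ≤ m) := by omega
    simp [this]
  rw [innerFold_eq travel ((m : Int) + 1) hi (browP K travel m)
      (PySem.List.pyRange 0 (K + 1) 1) (tableP K travel m)
      (by rw [htn, length_tableP]; omega) hprev
      (by
        intro k hk
        obtain ⟨hk0, hk1⟩ := (PySem.List.mem_pyRange_one).mp hk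
        rw [hrow, length_zrowP, getD_zrowP]
        exact ⟨hk0, by omega, rfl⟩)
      (PySem.List.pairwise_lt_pyRange_one 0 (K + 1))]
  rw [foldl_cset ((m : Int) + 1) _ _ _ (by rw [htn, length_tableP]; omega), hrow]
  rw [fill_row (K + 1) _ 0 le_rfl (zrowP K) (length_zrowP K)]
  have hdec : decide ((m : Int) + 1 = 1) = decide (m = 0) := by
    rw [decide_eq_decide]; omega
  have hstep : (PySem.List.pyRange 0 (K + 1) 1).map
      (fun k => altCell ((travel.getD ((m : Int) + 1 - 1).toNat []).getD 0 0)
        ((travel.getD ((m : Int) + 1 - 1).toNat []).getD 1 0)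
        ((travel.getD ((m : Int) + 1 - 1).toNat []).getD 2 0)
        ((travel.getD ((m : Int) + 1 - 1).toNat []).getD 3 0)
        (browP K travel m) (decide ((m : Int) + 1 = 1)) k) = browP K travel (m + 1) := by
    rw [htp, hdec]
    rfl
  rw [htn, hstep]
  simpa using set_tableP K travel m hm

theorem outer_all (K : Int) (travel : List (List Int)) :
    ∀ (m : Nat), m ≤ travel.length →
      (PySem.List.pyRange 1 ((m : Int) + 1) 1).foldl
        (fun c i => (PySem.List.pyRange 0 (K + 1) 1).foldl (innerBodyA travel i) c)
        (tableP K travel 0) = tableP K travel m := by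
  intro m
  induction m with
  | zero =>
    intro _
    have h0 : PySem.List.pyRange 1 (((0 : Nat) : Int) + 1) 1 = [] :=
      PySem.List.pyRange_one_eq_nil (by omega)
    rw [h0]
    rfl
  | succ m ih =>
    intro hm
    have hcast : ((m + 1 : Nat) : Int) + 1 = ((m : Int) + 1) + 1 := by push_cast; ring
    have hsplit : PySem.List.pyRange 1 (((m : Int) + 1) + 1) 1 =
        PySem.List.pyRange 1 ((m : Int) + 1) 1 ++ [(m : Int) + 1] :=
      PySem.List.pyRange_one_succ_right (by omega)
    rw [hcast, hsplit, List.foldl_append, ih (by omega), List.foldl_cons, List.foldl_nil]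
    exact outer_step K travel m (by omega)

theorem solutionA_eq (K : Int) (travel : List (List Int)) :
    solution K travel = (browP K travel travel.length).getD K.toNat 0 := by
  show cgetA ((PySem.List.pyRange 1 ((travel.length : Int) + 1) 1).foldl
      (fun c i => (PySem.List.pyRange 0 (K + 1) 1).foldl (innerBodyA travel i) c)
      (List.replicate (travel.length + 1) (List.replicate (K + 1).toNat 0))) (travel.length : Int) K
    = (browP K travel travel.length).getD K.toNat 0
  rw [show (List.replicate (travel.length + 1) (List.replicate (K + 1).toNat 0)) =
      tableP K travel 0 from (tableP_zero K travel).symm]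
  rw [outer_all K travel travel.length le_rfl]
  unfold cgetA
  rw [Int.toNat_natCast, getD_tableP K travel travel.length travel.length le_rfl]
  by_cases hn : 1 ≤ travel.length
  · rw [if_pos ⟨hn, le_rfl⟩]
  · have h0 : travel.length = 0 := by omega
    rw [h0, if_neg (by omega)]
    rfl

-- ---- A-side: the row after j legs computes gP ----

theorem times_nonneg (travel : List (List Int))
    (ht : ∀ t ∈ travel, 0 ≤ t.getD 0 0 ∧ 0 ≤ t.getD 2 0) (j : Nat) :
    0 ≤ (travel.getD j []).getD 0 0 ∧ 0 ≤ (travel.getD j []).getD 2 0 := by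
  by_cases hj : j < travel.length
  · rw [List.getD_eq_getElem _ _ hj]
    exact ht _ (List.getElem_mem hj)
  · have h : travel.getD j [] = [] := by
      rw [List.getD_eq_getElem?_getD, List.getElem?_eq_none (by omega)]
      rfl
    rw [h]
    exact ⟨le_rfl, le_rfl⟩

theorem getD_map_pyRange0 (f : Int → Int) (b k : Int) (h0 : 0 ≤ k) (h1 : k < b) :
    ((PySem.List.pyRange 0 b 1).map f).getD k.toNat 0 = f k := by
  have hlen : ((PySem.List.pyRange 0 b 1).map f).length = (b - 0).toNat := by
    rw [List.length_map, PySem.List.length_pyRange_one]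
  rw [List.getD_eq_getElem _ _ (by omega), List.getElem_map, PySem.List.getElem_pyRange_one]
  congr 1
  omega

-- the abstract cell applied to a row that matches gP gives gP one level up
theorem cell_eq_gP (travel : List (List Int)) (j : Nat) (k : Int) (prev : List Int)
    (hw : (travel.getD j []).getD 0 0 ≤ k →
      prev.getD (k - (travel.getD j []).getD 0 0).toNat 0 = gP travel j (k - (travel.getD j []).getD 0 0))
    (hb : (travel.getD j []).getD 2 0 ≤ k →
      prev.getD (k - (travel.getD j []).getD 2 0).toNat 0 = gP travel j (k - (travel.getD j []).getD 2 0)) :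
    altCell ((travel.getD j []).getD 0 0) ((travel.getD j []).getD 1 0)
      ((travel.getD j []).getD 2 0) ((travel.getD j []).getD 3 0) prev (decide (j = 0)) k =
    gP travel (j + 1) k := by
  simp only [altCell, gP, decide_eq_true_eq, List.getD_eq_getElem?_getD]
  simp only [List.getD_eq_getElem?_getD] at hw hb
  by_cases hw0 : (travel.getD j []).getD 0 0 ≤ k <;>
    by_cases hb0 : (travel.getD j []).getD 2 0 ≤ k <;>
    simp only [List.getD_eq_getElem?_getD] at hw0 hb0
  · simp only [hw hw0, hb hb0]
  · simp only [hw hw0]; simp [hb0]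
  · simp only [hb hb0]; simp [hw0]
  · simp [hw0, hb0]

theorem brow_eq_gP (K : Int) (travel : List (List Int))
    (ht : ∀ t ∈ travel, 0 ≤ t.getD 0 0 ∧ 0 ≤ t.getD 2 0) :
    ∀ (j : Nat) (k : Int), 0 ≤ k → k ≤ K →
      (browP K travel j).getD k.toNat 0 = gP travel j k := by
  intro j
  induction j with
  | zero => intro k _ _; exact getD_zrowP K k.toNat
  | succ j ih =>
    intro k hk0 hkK
    show (altStep K (browP K travel j) (travel.getD j []) (decide (j = 0))).getD k.toNat 0 = _
    unfold altStep
    rw [getD_map_pyRange0 _ _ _ hk0 (by omega)]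
    apply cell_eq_gP
    · intro hg
      exact ih _ (by omega) (by have := (times_nonneg travel ht j).1; omega)
    · intro hg
      exact ih _ (by omega) (by have := (times_nonneg travel ht j).2; omega)

theorem solutionA_eq_gP (K : Int) (travel : List (List Int)) (hK : 0 ≤ K)
    (ht : ∀ t ∈ travel, 0 ≤ t.getD 0 0 ∧ 0 ≤ t.getD 2 0) :
    solution K travel = gP travel travel.length K := by
  rw [solutionA_eq, brow_eq_gP K travel ht travel.length K hK le_rfl]

-- ---- B-side: the backward levels list ----

def levelsAux (cur : PySem.Set Int) : List (List Int) → List (PySem.Set Int)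
  | [] => []
  | t :: ts => altBack t cur :: levelsAux (altBack t cur) ts

theorem foldl_levels (rl : List (List Int)) :
    ∀ (acc : List (PySem.Set Int)) (cur : PySem.Set Int),
      (rl.foldl (fun (st : List (PySem.Set Int) × PySem.Set Int) t =>
        let nxt := altBack t st.2
        (st.1 ++ [nxt], nxt)) (acc, cur)).1 = acc ++ levelsAux cur rl := by
  induction rl with
  | nil => intro acc cur; simp [levelsAux]
  | cons t ts ih =>
    intro acc cur
    rw [List.foldl_cons, ih, levelsAux]
    simp

theorem length_levelsAux (rl : List (List Int)) :
    ∀ cur, (levelsAux cur rl).length = rl.length := by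
  induction rl with
  | nil => intro cur; rfl
  | cons t ts ih => intro cur; simp [levelsAux, ih]

theorem levels_chain (rl : List (List Int)) :
    ∀ (cur : PySem.Set Int) (j : Nat), j < rl.length →
      (cur :: levelsAux cur rl).getD (j + 1) PySem.Set.empty =
        altBack (rl.getD j []) ((cur :: levelsAux cur rl).getD j PySem.Set.empty) := by
  induction rl with
  | nil => intro cur j hj; simp at hj
  | cons t ts ih =>
    intro cur j hj
    cases j with
    | zero => rfl
    | succ m =>
      have := ih (altBack t cur) m (by simpa using hj)
      simpa [levelsAux] using this

theorem altNeeds_eq (K : Int) (travel : List (List Int)) :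
    altNeeds K travel =
      (PySem.Set.add PySem.Set.empty K ::
        levelsAux (PySem.Set.add PySem.Set.empty K) travel.reverse).reverse := by
  simp only [altNeeds]
  rw [foldl_levels]
  rfl

theorem needs_getD (K : Int) (travel : List (List Int)) (i : Nat) (hi : i ≤ travel.length) :
    (altNeeds K travel).getD i PySem.Set.empty =
      (PySem.Set.add PySem.Set.empty K ::
        levelsAux (PySem.Set.add PySem.Set.empty K) travel.reverse).getD
        (travel.length - i) PySem.Set.empty := by
  have hlen : (PySem.Set.add PySem.Set.empty K ::
      levelsAux (PySem.Set.add PySem.Set.empty K) travel.reverse).length = travel.length + 1 := by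
    simp [length_levelsAux]
  rw [altNeeds_eq,
    List.getD_eq_getElem _ _ (by rw [List.length_reverse, hlen]; omega),
    List.getD_eq_getElem _ _ (by rw [hlen]; omega), List.getElem_reverse]
  simp only [hlen, show travel.length + 1 - 1 - i = travel.length - i from by omega]

theorem needs_top (K : Int) (travel : List (List Int)) :
    K ∈ (altNeeds K travel).getD travel.length PySem.Set.empty := by
  rw [needs_getD K travel travel.length le_rfl, Nat.sub_self]
  show K ∈ PySem.Set.add PySem.Set.empty K
  simp [PySem.Set.mem_add]

theorem needs_step (K : Int) (travel : List (List Int)) (i : Nat) (hi : i < travel.length) :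
    (altNeeds K travel).getD i PySem.Set.empty =
      altBack (travel.getD i []) ((altNeeds K travel).getD (i + 1) PySem.Set.empty) := by
  rw [needs_getD K travel i (by omega), needs_getD K travel (i + 1) (by omega)]
  have h1 : travel.length - i = (travel.length - (i + 1)) + 1 := by omega
  rw [h1, levels_chain travel.reverse _ _ (by simp; omega)]
  congr 1
  rw [List.getD_eq_getElem _ _ (by simp; omega), List.getD_eq_getElem _ _ (by omega),
    List.getElem_reverse]
  congr 1
  omega

-- membership is preserved through the backward fold, and needed sub-budgets are added
theorem mem_backfold_mono (t : List Int) (cur : List Int) :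
    ∀ (s : PySem.Set Int) (x : Int), x ∈ s →
      x ∈ cur.foldl (fun nxt k =>
        let nxt := if t.getD 0 0 ≤ k then PySem.Set.add nxt (k - t.getD 0 0) else nxt
        if t.getD 2 0 ≤ k then PySem.Set.add nxt (k - t.getD 2 0) else nxt) s := by
  induction cur with
  | nil => intro s x hx; exact hx
  | cons k ks ih =>
    intro s x hx
    rw [List.foldl_cons]
    apply ih
    split_ifs <;> simp [PySem.Set.mem_add, hx]

theorem mem_altBack (t : List Int) (cur : PySem.Set Int) (k : Int) (hk : k ∈ cur) :
    (t.getD 0 0 ≤ k → (k - t.getD 0 0) ∈ altBack t cur) ∧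
    (t.getD 2 0 ≤ k → (k - t.getD 2 0) ∈ altBack t cur) := by
  unfold altBack
  have main : ∀ (cur : List Int) (s : PySem.Set Int), k ∈ cur →
      (t.getD 0 0 ≤ k → (k - t.getD 0 0) ∈ cur.foldl (fun nxt k =>
        let nxt := if t.getD 0 0 ≤ k then PySem.Set.add nxt (k - t.getD 0 0) else nxt
        if t.getD 2 0 ≤ k then PySem.Set.add nxt (k - t.getD 2 0) else nxt) s) ∧
      (t.getD 2 0 ≤ k → (k - t.getD 2 0) ∈ cur.foldl (fun nxt k =>
        let nxt := if t.getD 0 0 ≤ k then PySem.Set.add nxt (k - t.getD 0 0) else nxt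
        if t.getD 2 0 ≤ k then PySem.Set.add nxt (k - t.getD 2 0) else nxt) s) := by
    intro cur
    induction cur with
    | nil => intro s hk; simp at hk
    | cons x xs ih =>
      intro s hk
      rcases List.mem_cons.mp hk with hx | hx
      · subst hx
        constructor
        · intro hg
          rw [List.foldl_cons]
          apply mem_backfold_mono
          split_ifs <;>
            first
              | simp [PySem.Set.mem_add]
              | (exfalso; exact absurd hg (by assumption))
        · intro hg
          rw [List.foldl_cons]
          apply mem_backfold_mono
          split_ifs <;>
            first
              | simp [PySem.Set.mem_add]
              | (exfalso; exact absurd hg (by assumption))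
      · exact ⟨fun hg => by rw [List.foldl_cons]; exact ((ih _ hx).1 hg),
               fun hg => by rw [List.foldl_cons]; exact ((ih _ hx).2 hg)⟩
  exact main cur PySem.Set.empty hk

-- ---- B-side: the forward pass ----

def valsAt (K : Int) (travel : List (List Int)) : Nat → PySem.Dict Int Int
  | 0 => ((altNeeds K travel).getD 0 PySem.Set.empty).foldl
      (fun (d : PySem.Dict Int Int) k => d.insert k 0) PySem.Dict.empty
  | i + 1 => altLevel (altNeeds K travel) travel (valsAt K travel i) ((i : Int) + 1)

theorem getD_foldl_insert_fun (f : Int → Int) :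
    ∀ (s : List Int) (d : PySem.Dict Int Int) (k : Int),
      (s.foldl (fun d x => d.insert x (f x)) d).getD k 0 =
        if k ∈ s then f k else d.getD k 0 := by
  intro s
  induction s with
  | nil => intro d k; simp
  | cons x xs ih =>
    intro d k
    rw [List.foldl_cons, ih]
    by_cases hxs : k ∈ xs
    · simp [hxs]
    · rw [if_neg hxs, PySem.Dict.getD_insert]
      by_cases hx : k = x
      · simp [hx]
      · simp [hx, hxs, List.mem_cons]

theorem getD_foldl_insert_zero (s : List Int) (d : PySem.Dict Int Int) (k : Int) :
    (s.foldl (fun (d : PySem.Dict Int Int) x => d.insert x 0) d).getD k 0 =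
      if k ∈ s then 0 else d.getD k 0 :=
  getD_foldl_insert_fun (fun _ => 0) s d k

theorem cellB_eq_gP (travel : List (List Int)) (j : Nat) (k : Int) (vals : PySem.Dict Int Int)
    (hw : (travel.getD j []).getD 0 0 ≤ k →
      vals.getD (k - (travel.getD j []).getD 0 0) 0 = gP travel j (k - (travel.getD j []).getD 0 0))
    (hb : (travel.getD j []).getD 2 0 ≤ k →
      vals.getD (k - (travel.getD j []).getD 2 0) 0 = gP travel j (k - (travel.getD j []).getD 2 0)) :
    altCellB ((travel.getD j []).getD 0 0) ((travel.getD j []).getD 1 0)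
      ((travel.getD j []).getD 2 0) ((travel.getD j []).getD 3 0) vals ((j : Int) + 1) k =
    gP travel (j + 1) k := by
  have hflag : ((j : Int) + 1 = 1) ↔ (j = 0) := by omega
  simp only [altCellB, gP, hflag, List.getD_eq_getElem?_getD]
  simp only [List.getD_eq_getElem?_getD] at hw hb
  by_cases hw0 : (travel.getD j []).getD 0 0 ≤ k <;>
    by_cases hb0 : (travel.getD j []).getD 2 0 ≤ k <;>
    simp only [List.getD_eq_getElem?_getD] at hw0 hb0
  · simp only [hw hw0, hb hb0]
  · simp only [hw hw0]; simp [hb0]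
  · simp only [hb hb0]; simp [hw0]
  · simp [hw0, hb0]

theorem vals_invariant (K : Int) (travel : List (List Int)) :
    ∀ (i : Nat), i ≤ travel.length →
      ∀ k ∈ (altNeeds K travel).getD i PySem.Set.empty,
        (valsAt K travel i).getD k 0 = gP travel i k := by
  intro i
  induction i with
  | zero =>
    intro _ k _
    show (((altNeeds K travel).getD 0 PySem.Set.empty).foldl
      (fun (d : PySem.Dict Int Int) x => d.insert x 0) PySem.Dict.empty).getD k 0 = 0
    rw [getD_foldl_insert_zero]
    split <;> simp
  | succ i ih =>
    intro hi k hk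
    show (altLevel (altNeeds K travel) travel (valsAt K travel i) ((i : Int) + 1)).getD k 0 = _
    unfold altLevel
    have ht1 : (((i : Int) + 1) - 1).toNat = i := by omega
    have ht2 : ((i : Int) + 1).toNat = i + 1 := by omega
    rw [ht1, ht2,
      getD_foldl_insert_fun (altCellB ((travel.getD i []).getD 0 0) ((travel.getD i []).getD 1 0)
        ((travel.getD i []).getD 2 0) ((travel.getD i []).getD 3 0) (valsAt K travel i) ((i : Int) + 1)),
      if_pos hk]
    apply cellB_eq_gP
    · intro hg
      have hmem := (mem_altBack (travel.getD i [])
        ((altNeeds K travel).getD (i + 1) PySem.Set.empty) k hk).1 hg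
      rw [← needs_step K travel i (by omega)] at hmem
      exact ih (by omega) _ hmem
    · intro hg
      have hmem := (mem_altBack (travel.getD i [])
        ((altNeeds K travel).getD (i + 1) PySem.Set.empty) k hk).2 hg
      rw [← needs_step K travel i (by omega)] at hmem
      exact ih (by omega) _ hmem

theorem forward_all (K : Int) (travel : List (List Int)) :
    ∀ (m : Nat),
      (PySem.List.pyRange 1 ((m : Int) + 1) 1).foldl (altLevel (altNeeds K travel) travel)
        (valsAt K travel 0) = valsAt K travel m := by
  intro m
  induction m with
  | zero =>
    rw [PySem.List.pyRange_one_eq_nil (by omega)]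
    rfl
  | succ m ih =>
    have hcast : ((m + 1 : Nat) : Int) + 1 = ((m : Int) + 1) + 1 := by push_cast; ring
    rw [hcast, PySem.List.pyRange_one_succ_right (by omega), List.foldl_append, ih,
      List.foldl_cons, List.foldl_nil]
    rfl

theorem solutionB_eq_gP (K : Int) (travel : List (List Int)) :
    solution_alt K travel = gP travel travel.length K := by
  show ((PySem.List.pyRange 1 ((travel.length : Int) + 1) 1).foldl
      (altLevel (altNeeds K travel) travel) (valsAt K travel 0)).getD K 0 = _
  rw [forward_all]
  exact vals_invariant K travel travel.length le_rfl K (needs_top K travel)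

-- ===== VERDICT (by name: the statements are the Claim_ definitions above) =====
theorem solution_spec : Claim_equal_solution := by
  intro K travel _ hpre
  unfold Spec_solution
  rw [solutionB_eq_gP, solutionA_eq_gP K travel hpre.1 (fun t ht => ⟨(hpre.2 t ht).2.1, (hpre.2 t ht).2.2⟩)]
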